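-- pv_equiv track=rewrite | github.com/glurbo/iti0102-2019 | ex07_minesweeper/minesweeper.py | add_mines
-- ===== SOURCE A (Python) =====
-- import copy
--
-- def add_mines(minefield: list, mines: list) -> list:
--     """
--     Add mines to a minefield and return minefield.
--
--     This function cannot modify the original minefield list.
--     Minefield must be length long and width wide. Each non-mine position must contain single dot.
--     If a position is empty ("."), then a small mine is added ("x").
--     If a position contains small mine ("x"), a large mine is added ("X").
--     Mines are in a list.
--     Mine is a list. Each mine has 4 integer parameters in the format [N, S, E, W].
--         - N is the distance between area of mines and top of the minefield.
--         - S ... area of mines and bottom of the minefield.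
--         - E ... area of mines and right of the minefield.
--         - W ... area of mines and left of the minefield.
--     :param minefield: list
--     :param mines: list
--     :return: list
--     """
--     minefield = copy.deepcopy(minefield)
--     for mine in mines:
--         for rowi in range(mine[0], len(minefield) - mine[1]):
--             for coli in range(mine[3], len(minefield[rowi]) - mine[2]):
--                 if minefield[rowi][coli] == ".":
--                     minefield[rowi][coli] = "x"
--                 elif minefield[rowi][coli] == "x":
--                     minefield[rowi][coli] = "X"
--     return minefield
-- ===== SOURCE B (Python) =====
-- def add_mines(minefield: list, mines: list) -> list:
--     """Difference-array version: one +1/-1 pair per (mine,row), then one prefix-sum sweep per row."""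
--     rows = len(minefield)
--     result = []
--     for i, row in enumerate(minefield):
--         width = len(row)
--         diff = [0] * (width + 1)
--         for m in mines:
--             if m[0] <= i < rows - m[1]:
--                 lo = max(m[3], 0)
--                 hi = min(width - m[2], width)
--                 if lo < hi:
--                     diff[lo] += 1
--                     diff[hi] -= 1
--         count = 0
--         new_row = []
--         for j, cell in enumerate(row):
--             count += diff[j]
--             if count == 0 or (cell != "." and cell != "x"):
--                 new_row.append(cell)
--             elif cell == "x" or count > 1:
--                 new_row.append("X")
--             else:
--                 new_row.append("x")
--         result.append(new_row)
--     return result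
-- ===== Notes on version B (the rewrite author's own statement) =====
-- stated objective: faster
-- what changed: A sweeps every cell of every mine's rectangle per mine (deep-copying and mutating in place); B makes one pass per row, accumulating a +1/-1 difference pair per applicable mine into a per-row difference array and rendering each cell from the running coverage count in a single prefix-sum sweep.
-- outside the precondition, e.g. on add_mines([['.', '.']], [[-1, 0, 0, 0]]): A returns [['X', 'X']], B returns [['x', 'x']]
import Mathlib
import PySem

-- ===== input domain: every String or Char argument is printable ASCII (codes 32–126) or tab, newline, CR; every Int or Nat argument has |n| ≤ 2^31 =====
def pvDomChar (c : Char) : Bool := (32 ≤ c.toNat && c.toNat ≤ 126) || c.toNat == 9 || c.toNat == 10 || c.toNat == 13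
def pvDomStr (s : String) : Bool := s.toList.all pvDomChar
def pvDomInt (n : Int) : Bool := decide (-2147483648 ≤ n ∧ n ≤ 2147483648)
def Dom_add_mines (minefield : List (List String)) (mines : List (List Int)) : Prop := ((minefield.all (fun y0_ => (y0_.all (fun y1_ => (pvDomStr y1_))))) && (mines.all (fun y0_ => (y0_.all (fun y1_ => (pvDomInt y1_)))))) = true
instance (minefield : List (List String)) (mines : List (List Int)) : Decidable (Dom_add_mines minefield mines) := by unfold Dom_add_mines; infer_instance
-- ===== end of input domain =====

-- B replaces A's per-mine cell-by-cell sweep by one per-row difference array (one +1/-1 pair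
-- per mine and row, then a single prefix-sum sweep per row); equality of RETURN values is
-- proved on Pre_ (A also deep-copies its input, so neither program mutates its arguments).

-- ===== PORT A =====
-- IndexError paths of A (short mine list, index outside the grid) are modelled by getD
-- defaults; Pre_add_mines excludes exactly those inputs, so the port is faithful on Pre_.
def add_mines (minefield : List (List String)) (mines : List (List Int)) : List (List String) :=
  mines.foldl (fun mf mine =>
    (PySem.List.pyRange (PySem.List.pyGetD mine 0 0)
        ((mf.length : Int) - PySem.List.pyGetD mine 1 0) 1).foldl (fun mf rowi =>
      (PySem.List.pyRange (PySem.List.pyGetD mine 3 0)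
          (((PySem.List.pyGetD mf rowi []).length : Int) - PySem.List.pyGetD mine 2 0) 1).foldl
        (fun mf coli =>
          let row := PySem.List.pyGetD mf rowi []
          let c := PySem.List.pyGetD row coli ""
          if c = "." then PySem.List.pySetD mf rowi (PySem.List.pySetD row coli "x")
          else if c = "x" then PySem.List.pySetD mf rowi (PySem.List.pySetD row coli "X")
          else mf) mf) mf) minefield

-- ===== PORT B =====
def add_mines_alt (minefield : List (List String)) (mines : List (List Int)) : List (List String) :=
  let rows : Int := minefield.length
  (PySem.List.enumerate minefield 0).map (fun p =>
    let i := p.1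
    let row := p.2
    let width : Int := row.length
    let diff : List Int := mines.foldl (fun d m =>
      if PySem.List.pyGetD m 0 0 ≤ i ∧ i < rows - PySem.List.pyGetD m 1 0 then
        let lo := max (PySem.List.pyGetD m 3 0) 0
        let hi := min (width - PySem.List.pyGetD m 2 0) width
        if lo < hi then
          let d1 := PySem.List.pySetD d lo (PySem.List.pyGetD d lo 0 + 1)
          PySem.List.pySetD d1 hi (PySem.List.pyGetD d1 hi 0 - 1)
        else d
      else d) (List.replicate (row.length + 1) 0)
    ((PySem.List.enumerate row 0).foldl (fun (acc : Int × List String) q =>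
      let c := acc.1 + PySem.List.pyGetD diff q.1 0
      (c, acc.2 ++ [if c = 0 ∨ (q.2 ≠ "." ∧ q.2 ≠ "x") then q.2
                    else if q.2 = "x" ∨ 1 < c then "X" else "x"])) ((0 : Int), ([] : List String))).2)

-- ===== PRECONDITION & SPEC =====
-- Pre_add_mines holds exactly when A returns without any Python negative-index wraparound:
-- every mine must expose indices 0..1 (A reads mine[0]/mine[1] unconditionally; IndexError
-- otherwise) and, whenever its row range is nonempty, expose indices 0..3 and keep every
-- visited row/column index inside the grid (an index past the end raises IndexError; mines
-- with negative distances are malformed input, outside the task's natural domain, on which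
-- A would wrap around to the far edge — excluded, see the cite in the claim).
def Pre_add_mines (minefield : List (List String)) (mines : List (List Int)) : Prop :=
  ∀ m ∈ mines, 2 ≤ m.length ∧
    (m.getD 0 0 < (minefield.length : Int) - m.getD 1 0 →
      4 ≤ m.length ∧ 0 ≤ m.getD 0 0 ∧ 0 ≤ m.getD 1 0 ∧
      ∀ p ∈ PySem.List.enumerate minefield 0,
        m.getD 0 0 ≤ p.1 → p.1 < (minefield.length : Int) - m.getD 1 0 →
        m.getD 3 0 < (p.2.length : Int) - m.getD 2 0 →
        0 ≤ m.getD 2 0 ∧ 0 ≤ m.getD 3 0)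
instance (minefield : List (List String)) (mines : List (List Int)) : Decidable (Pre_add_mines minefield mines) := by unfold Pre_add_mines; infer_instance

def pvWitness_add_mines : List (List String) × List (List Int) :=
  ([[".", "x", "#"], [".", "."]], [[0, 0, 0, 1], [1, 0, 0, 0]])

def Spec_add_mines (minefield : List (List String)) (mines : List (List Int)) (out : List (List String)) : Prop := out = add_mines_alt minefield mines
instance (minefield : List (List String)) (mines : List (List Int)) (out : List (List String)) : Decidable (Spec_add_mines minefield mines out) := by unfold Spec_add_mines; infer_instance

-- ===== CLAIM (what is proved, stated in full; the proofs are below) =====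
def Claim_equal_add_mines : Prop := ∀ (minefield : List (List String)) (mines : List (List Int)), Dom_add_mines minefield mines → Pre_add_mines minefield mines → Spec_add_mines minefield mines (add_mines minefield mines)

-- ===== LEMMAS AND PROOFS =====

-- saturating increment A applies to one cell
def pvBump (s : String) : String := if s = "." then "x" else if s = "x" then "X" else s

-- the character a cell with original content s and coverage count c ends up as (B's branch)
def pvRenderI (s : String) (c : Int) : String :=
  if c = 0 ∨ (s ≠ "." ∧ s ≠ "x") then s else if s = "x" ∨ 1 < c then "X" else "x"

def pvM (m : List Int) (k : Nat) : Int := PySem.List.pyGetD m (k : Int) 0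

def pvLo (m : List Int) : Int := max (pvM m 3) 0
def pvHi (L : Int) (m : List Int) : Int := min (L - pvM m 2) L

-- does mine m cover cell (i, j) of a row of length L, in a field of R rows (clamped form)
def pvCov (R L i j : Int) (m : List Int) : Bool :=
  decide (pvM m 0 ≤ i) && decide (i < R - pvM m 1) && decide (pvLo m ≤ j) && decide (j < pvHi L m)

def pvCnt (R L i j : Int) (mines : List (List Int)) : Nat := mines.countP (pvCov R L i j)

def pvMapEnum {α β : Type} (f : Int → α → β) (xs : List α) : List β :=
  (PySem.List.enumerate xs 0).map (fun p => f p.1 p.2)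

-- the common functional spec: every cell rendered from its coverage count
def pvSpec (mf : List (List String)) (mines : List (List Int)) : List (List String) :=
  pvMapEnum (fun i row =>
    pvMapEnum (fun j c => pvRenderI c ((pvCnt (mf.length : Int) (row.length : Int) i j mines : Nat) : Int)) row) mf

-- mirrors of port A's loop bodies (definitional)
def pvColStep (rowi : Int) (mf : List (List String)) (coli : Int) : List (List String) :=
  let row := PySem.List.pyGetD mf rowi []
  let c := PySem.List.pyGetD row coli ""
  if c = "." then PySem.List.pySetD mf rowi (PySem.List.pySetD row coli "x")
  else if c = "x" then PySem.List.pySetD mf rowi (PySem.List.pySetD row coli "X")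
  else mf

def pvRowStep (mine : List Int) (mf : List (List String)) (rowi : Int) : List (List String) :=
  (PySem.List.pyRange (PySem.List.pyGetD mine 3 0)
      (((PySem.List.pyGetD mf rowi []).length : Int) - PySem.List.pyGetD mine 2 0) 1).foldl
    (pvColStep rowi) mf

def pvMineStep (mf : List (List String)) (mine : List Int) : List (List String) :=
  (PySem.List.pyRange (PySem.List.pyGetD mine 0 0)
      ((mf.length : Int) - PySem.List.pyGetD mine 1 0) 1).foldl (pvRowStep mine) mf

theorem add_mines_eq (mf : List (List String)) (mines : List (List Int)) :
    add_mines mf mines = mines.foldl pvMineStep mf := rfl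

-- mirrors of port B's loop bodies (definitional)
def pvDiffStep (rows i width : Int) (d : List Int) (m : List Int) : List Int :=
  if PySem.List.pyGetD m 0 0 ≤ i ∧ i < rows - PySem.List.pyGetD m 1 0 then
    let lo := max (PySem.List.pyGetD m 3 0) 0
    let hi := min (width - PySem.List.pyGetD m 2 0) width
    if lo < hi then
      let d1 := PySem.List.pySetD d lo (PySem.List.pyGetD d lo 0 + 1)
      PySem.List.pySetD d1 hi (PySem.List.pyGetD d1 hi 0 - 1)
    else d
  else d

def pvDiff (rows i : Int) (row : List String) (mines : List (List Int)) : List Int :=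
  mines.foldl (pvDiffStep rows i (row.length : Int)) (List.replicate (row.length + 1) 0)

def pvScanStep (diff : List Int) (acc : Int × List String) (q : Int × String) : Int × List String :=
  let c := acc.1 + PySem.List.pyGetD diff q.1 0
  (c, acc.2 ++ [if c = 0 ∨ (q.2 ≠ "." ∧ q.2 ≠ "x") then q.2
                else if q.2 = "x" ∨ 1 < c then "X" else "x"])

theorem add_mines_alt_eq (mf : List (List String)) (mines : List (List Int)) :
    add_mines_alt mf mines =
      pvMapEnum (fun i row =>
        ((PySem.List.enumerate row 0).foldl (pvScanStep (pvDiff (mf.length : Int) i row mines))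
          ((0 : Int), ([] : List String))).2) mf := rfl

-- membership-of-the-prefix-sum predicate: does m's (clamped) interval contain [k-1, k)?
def pvPrefP (rows L i k : Int) (m : List Int) : Bool :=
  decide (pvM m 0 ≤ i) && decide (i < rows - pvM m 1) &&
  decide (pvLo m < pvHi L m) && decide (pvLo m < k) && decide (k ≤ pvHi L m)

-- basic pvMapEnum facts
theorem length_pvMapEnum {α β : Type} (f : Int → α → β) (xs : List α) :
    (pvMapEnum f xs).length = xs.length := by
  simp [pvMapEnum, PySem.List.length_enumerate]

theorem getElem_pvMapEnum {α β : Type} (f : Int → α → β) (xs : List α) (k : Nat)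
    (hk : k < xs.length) :
    (pvMapEnum f xs)[k]'(by simpa [length_pvMapEnum] using hk) = f (k : Int) xs[k] := by
  simp [pvMapEnum, PySem.List.getElem_enumerate]

theorem pvMapEnum_id {α : Type} (xs : List α) : pvMapEnum (fun _ x => x) xs = xs := by
  rw [pvMapEnum]
  exact PySem.List.map_snd_enumerate xs 0

theorem pvMapEnum_congr {α β : Type} {f g : Int → α → β} (xs : List α)
    (h : ∀ (k : Nat) (hk : k < xs.length), f (k : Int) (xs[k]'hk) = g (k : Int) (xs[k]'hk)) :
    pvMapEnum f xs = pvMapEnum g xs := by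
  apply List.ext_getElem (by simp [length_pvMapEnum])
  intro k h1 h2
  have hk : k < xs.length := by simpa [length_pvMapEnum] using h1
  rw [getElem_pvMapEnum f xs k hk, getElem_pvMapEnum g xs k hk]
  exact h k hk

theorem pvMapEnum_comp {α β γ : Type} (f : Int → α → β) (g : Int → β → γ) (xs : List α) :
    pvMapEnum g (pvMapEnum f xs) = pvMapEnum (fun i x => g i (f i x)) xs := by
  apply List.ext_getElem (by simp [length_pvMapEnum])
  intro k h1 h2
  have hk : k < xs.length := by simpa [length_pvMapEnum] using h1
  rw [getElem_pvMapEnum g _ k (by simpa [length_pvMapEnum] using hk),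
    getElem_pvMapEnum f xs k hk, getElem_pvMapEnum (fun i x => g i (f i x)) xs k hk]

-- iterating pvBump n times is rendering with count n
theorem pvBump_iterate (s : String) (n : Nat) : pvBump^[n] s = pvRenderI s (n : Int) := by
  induction n with
  | zero => simp [pvRenderI]
  | succ n ih =>
    rw [Function.iterate_succ_apply', ih]
    by_cases h1 : s = "."
    · subst h1
      rcases Nat.eq_zero_or_pos n with h | h
      · subst h; simp [pvRenderI, pvBump]
      · by_cases h3 : n = 1
        · subst h3; simp [pvRenderI, pvBump]
        · have h4 : (1:Int) < n := by omega
          have h0 : ¬ n = 0 := by omega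
          have hI : ¬ ((n:Int) + 1 = 0) := by omega
          simp [pvRenderI, pvBump, h4, h0, hI, h]
    · by_cases h2 : s = "x"
      · subst h2
        rcases Nat.eq_zero_or_pos n with h | h
        · subst h; simp [pvRenderI, pvBump]
        · have h0 : ¬ n = 0 := by omega
          have hI : ¬ ((n:Int) + 1 = 0) := by omega
          simp [pvRenderI, pvBump, h0, hI]
      · simp [pvRenderI, pvBump, h1, h2]

theorem pvBump_render (s : String) (n : Nat) :
    pvBump (pvRenderI s (n : Int)) = pvRenderI s ((n : Int) + 1) := by
  have h1 := pvBump_iterate s n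
  have h2 := pvBump_iterate s (n + 1)
  rw [Function.iterate_succ_apply', h1] at h2
  rw [h2]; push_cast; ring_nf

-- === B-side: the difference array accumulates interval indicators ===

-- adding v at position a shifts every prefix sum that passes a by v
theorem sum_take_set_add (d : List Int) (a k : Nat) (v : Int) (ha : a < d.length) :
    ((d.set a (d[a] + v)).take k).sum = (d.take k).sum + if a < k then v else 0 := by
  induction d generalizing a k with
  | nil => simp at ha
  | cons x xs ih =>
    cases a with
    | zero =>
      cases k with
      | zero => simp
      | succ k => simp [List.take_succ_cons, List.sum_cons]; ring
    | succ a =>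
      cases k with
      | zero => simp
      | succ k =>
        simp only [List.set_cons_succ, List.take_succ_cons, List.sum_cons, List.getElem_cons_succ]
        rw [ih a k (by simpa using ha)]
        have h5 : a + 1 < k + 1 ↔ a < k := by omega
        simp [h5]
        ring

theorem pvDiffStep_length (rows i width : Int) (d : List Int) (m : List Int) :
    (pvDiffStep rows i width d m).length = d.length := by
  unfold pvDiffStep
  dsimp only
  split_ifs <;> simp [PySem.List.length_pySetD]

theorem pvDiffStep_take_sum (rows i width : Int) (d : List Int) (m : List Int) (k : Nat)
    (hd : (d.length : Int) = width + 1) :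
    ((pvDiffStep rows i width d m).take k).sum =
      (d.take k).sum + (if pvPrefP rows width i (k : Int) m then 1 else 0) := by
  have hP : (pvPrefP rows width i (k : Int) m = true) ↔
      ((PySem.List.pyGetD m 0 0 ≤ i ∧ i < rows - PySem.List.pyGetD m 1 0) ∧
        max (PySem.List.pyGetD m 3 0) 0 < min (width - PySem.List.pyGetD m 2 0) width ∧
        max (PySem.List.pyGetD m 3 0) 0 < (k : Int) ∧
        (k : Int) ≤ min (width - PySem.List.pyGetD m 2 0) width) := by
    simp only [pvPrefP, pvM, pvLo, pvHi, Bool.and_eq_true, decide_eq_true_eq]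
    push_cast
    tauto
  unfold pvDiffStep
  dsimp only
  by_cases h1 : PySem.List.pyGetD m 0 0 ≤ i ∧ i < rows - PySem.List.pyGetD m 1 0
  · rw [if_pos h1]
    set lo := max (PySem.List.pyGetD m 3 0) 0 with hlo
    set hi := min (width - PySem.List.pyGetD m 2 0) width with hhi
    by_cases h2 : lo < hi
    · rw [if_pos h2]
      have hlo0 : 0 ≤ lo := by simp [hlo]
      have hhiW : hi ≤ width := by simp [hhi]
      have hhi0 : 0 ≤ hi := by omega
      rw [PySem.List.pyGetD_eq_getElem d (0:Int) hlo0 (by omega),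
        PySem.List.pySetD_of_nonneg d _ hlo0]
      set d1 := d.set lo.toNat (d[lo.toNat]'(by omega) + 1) with hd1
      have hd1len : d1.length = d.length := by simp [hd1]
      rw [PySem.List.pyGetD_eq_getElem d1 (0:Int) hhi0 (by omega),
        PySem.List.pySetD_of_nonneg d1 _ hhi0, sub_eq_add_neg,
        sum_take_set_add d1 hi.toNat k (-1) (by omega), hd1,
        sum_take_set_add d lo.toNat k 1 (by omega)]
      by_cases hk1 : lo < (k : Int)
      · by_cases hk2 : (k : Int) ≤ hi
        · have e1 : lo.toNat < k := by omega
          have e2 : ¬ hi.toNat < k := by omega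
          rw [if_pos e1, if_neg e2, if_pos (hP.mpr ⟨h1, h2, hk1, hk2⟩)]; ring
        · have e1 : lo.toNat < k := by omega
          have e2 : hi.toNat < k := by omega
          have e3 : ¬ (pvPrefP rows width i (k : Int) m = true) := by rw [hP]; tauto
          rw [if_pos e1, if_pos e2, if_neg e3]; ring
      · have e1 : ¬ lo.toNat < k := by omega
        have e2 : ¬ hi.toNat < k := by omega
        have e3 : ¬ (pvPrefP rows width i (k : Int) m = true) := by rw [hP]; tauto
        rw [if_neg e1, if_neg e2, if_neg e3]; ring
    · rw [if_neg h2, if_neg (by rw [hP]; tauto)]; ring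
  · rw [if_neg h1, if_neg (by rw [hP]; tauto)]; ring

theorem pvDiff_length (rows i : Int) (row : List String) (mines : List (List Int)) :
    (pvDiff rows i row mines).length = row.length + 1 := by
  unfold pvDiff
  suffices h : ∀ (ms : List (List Int)) (d : List Int),
      (ms.foldl (pvDiffStep rows i (row.length : Int)) d).length = d.length by
    simp [h]
  intro ms
  induction ms with
  | nil => intro d; rfl
  | cons m ms ih => intro d; rw [List.foldl_cons, ih, pvDiffStep_length]

theorem pvDiff_take_sum (rows i : Int) (row : List String) (mines : List (List Int)) (k : Nat) :
    ((pvDiff rows i row mines).take k).sum =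
      ((mines.countP (pvPrefP rows (row.length : Int) i (k : Int))) : Int) := by
  unfold pvDiff
  suffices h : ∀ (ms : List (List Int)) (d : List Int), (d.length : Int) = (row.length : Int) + 1 →
      ((ms.foldl (pvDiffStep rows i (row.length : Int)) d).take k).sum =
        (d.take k).sum + ((ms.countP (pvPrefP rows (row.length : Int) i (k : Int))) : Int) by
    rw [h mines (List.replicate (row.length + 1) 0) (by simp)]
    simp [List.take_replicate]
  intro ms
  induction ms with
  | nil => intro d _; simp
  | cons m ms ih =>
    intro d hd
    rw [List.foldl_cons, ih _ (by rw [← hd, pvDiffStep_length]),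
      pvDiffStep_take_sum rows i (row.length : Int) d m k hd, List.countP_cons]
    push_cast
    split_ifs <;> ring

theorem pvPrefP_succ (rows L i : Int) (j : Nat) (m : List Int) :
    pvPrefP rows L i ((j : Nat) + 1 : Int) m = pvCov rows L i (j : Int) m := by
  simp only [pvPrefP, pvCov]
  rw [Bool.eq_iff_iff]
  simp only [Bool.and_eq_true, decide_eq_true_eq]
  unfold pvLo pvHi
  omega

-- the prefix-sum sweep renders each cell from its running count
theorem pvScan_go (diff : List Int) (rest : List String) (k : Nat) (c0 : Int)
    (acc : List String) (hk : k + rest.length ≤ diff.length - 1)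
    (hc : c0 = (diff.take k).sum) :
    ((PySem.List.enumerate rest (k : Int)).foldl (pvScanStep diff) (c0, acc)).2 =
      acc ++ (PySem.List.enumerate rest (k : Int)).map
        (fun q => pvRenderI q.2 ((diff.take (q.1.toNat + 1)).sum)) := by
  induction rest generalizing k c0 acc with
  | nil => simp [PySem.List.enumerate_nil]
  | cons x xs ih =>
    have hklen : k < diff.length := by
      simp only [List.length_cons] at hk; omega
    have hc1 : c0 + PySem.List.pyGetD diff (k : Int) 0 = (diff.take (k + 1)).sum := by
      rw [PySem.List.pyGetD_natCast, hc, List.sum_take_succ diff k hklen,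
        List.getD_eq_getElem diff 0 hklen]
    have step : pvScanStep diff (c0, acc) ((k : Int), x) =
        ((diff.take (k + 1)).sum, acc ++ [pvRenderI x ((diff.take (k + 1)).sum)]) := by
      unfold pvScanStep pvRenderI
      dsimp only
      rw [hc1]
    have hcast : ((k : Int) + 1) = (((k + 1 : Nat)) : Int) := by push_cast; ring
    rw [PySem.List.enumerate_cons, List.foldl_cons, step, hcast,
      ih (k + 1) _ _ (by simp only [List.length_cons] at hk; omega) rfl,
      List.map_cons]
    simp [Int.toNat_natCast]

theorem pvRowB_eq (rows i : Int) (row : List String) (mines : List (List Int)) :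
    ((PySem.List.enumerate row 0).foldl (pvScanStep (pvDiff rows i row mines))
        ((0 : Int), ([] : List String))).2 =
      pvMapEnum (fun j c =>
        pvRenderI c ((pvCnt rows (row.length : Int) i j mines : Nat) : Int)) row := by
  have h0 : (0 : Int) = ((0 : Nat) : Int) := rfl
  rw [h0, pvScan_go (pvDiff rows i row mines) row 0 (((0 : Nat)) : Int) []
    (by rw [pvDiff_length]; omega) (by simp)]
  unfold pvMapEnum
  rw [List.nil_append]
  apply List.map_congr_left
  intro q hq
  rw [PySem.List.mem_enumerate_iff] at hq
  obtain ⟨t, ht, rfl⟩ := hq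
  have hz : ((0 : Nat) : Int) + (t : Int) = ((t : Nat) : Int) := by push_cast; ring
  rw [hz, Int.toNat_natCast, pvDiff_take_sum rows i row mines (t + 1)]
  show pvRenderI _ _ = pvRenderI row[t] ((pvCnt rows (row.length : Int) i (t : Int) mines : Nat) : Int)
  simp only [pvCnt]
  congr 2
  apply List.countP_congr
  intro m _
  have hcast : (((t + 1 : Nat)) : Int) = ((t : Nat) : Int) + 1 := by push_cast; ring
  rw [hcast, pvPrefP_succ]

theorem pvB_eq_spec (mf : List (List String)) (mines : List (List Int)) :
    add_mines_alt mf mines = pvSpec mf mines := by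
  rw [add_mines_alt_eq]
  unfold pvSpec
  apply pvMapEnum_congr
  intro k hk
  exact pvRowB_eq (mf.length : Int) (k : Int) (mf[k]'hk) mines

-- === A-side: the triple loop bumps exactly the covered cells ===

theorem pySetD_self (mf : List (List String)) (r : Nat) (hr : r < mf.length) :
    PySem.List.pySetD mf (r : Int) (PySem.List.pyGetD mf (r : Int) []) = mf := by
  rw [PySem.List.pySetD_natCast, PySem.List.pyGetD_natCast,
    List.getD_eq_getElem mf [] hr, List.set_getElem_self]

theorem pvColLoop_eq (r : Nat) (a n : Nat) (mf : List (List String)) (hr : r < mf.length)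
    (hn : a + n ≤ (PySem.List.pyGetD mf (r : Int) []).length) :
    (PySem.List.pyRange (a : Int) ((a : Int) + (n : Int)) 1).foldl (pvColStep (r : Int)) mf =
      PySem.List.pySetD mf (r : Int)
        (pvMapEnum (fun j c => if (a : Int) ≤ j ∧ j < (a : Int) + (n : Int) then pvBump c else c)
          (PySem.List.pyGetD mf (r : Int) [])) := by
  induction n generalizing mf with
  | zero =>
    rw [PySem.List.pyRange_one_eq_nil (by omega), List.foldl_nil,
      pvMapEnum_congr (g := fun _ c => c) _
        (by intro t ht; simp only; rw [if_neg (by omega)]),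
      pvMapEnum_id, pySetD_self mf r hr]
  | succ n ih =>
    set row := PySem.List.pyGetD mf (r : Int) [] with hrowdef
    have hanlt : a + n < row.length := by omega
    have hcast : ((a : Int) + ((n + 1 : Nat) : Int)) = ((a : Int) + (n : Int)) + 1 := by
      push_cast; ring
    rw [hcast, PySem.List.pyRange_one_succ_right (by omega), List.foldl_append,
      ih mf hr (by rw [← hrowdef]; omega), List.foldl_cons, List.foldl_nil]
    set condn := fun (j : Int) (c : String) =>
      if (a : Int) ≤ j ∧ j < (a : Int) + (n : Int) then pvBump c else c with hcondn
    have hrow' : PySem.List.pyGetD (PySem.List.pySetD mf (r : Int) (pvMapEnum condn row)) (r : Int) []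
        = pvMapEnum condn row := by
      rw [PySem.List.pySetD_natCast, PySem.List.pyGetD_natCast,
        List.getD_eq_getElem _ [] (by simpa using hr), List.getElem_set_self]
    have hc : PySem.List.pyGetD (pvMapEnum condn row) ((a : Int) + (n : Int)) ""
        = row[a + n] := by
      rw [show ((a : Int) + (n : Int)) = (((a + n : Nat)) : Int) from by push_cast; ring,
        PySem.List.pyGetD_natCast,
        List.getD_eq_getElem _ "" (by rw [length_pvMapEnum]; omega),
        getElem_pvMapEnum condn row (a + n) hanlt, hcondn]
      simp only
      exact if_neg (by push_cast; omega)
    have hkey : ∀ v : String,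
        PySem.List.pySetD (PySem.List.pySetD mf (r : Int) (pvMapEnum condn row)) (r : Int)
            (PySem.List.pySetD (pvMapEnum condn row) ((a : Int) + (n : Int)) v)
          = PySem.List.pySetD mf (r : Int) ((pvMapEnum condn row).set (a + n) v) := by
      intro v
      rw [PySem.List.pySetD_natCast, PySem.List.pySetD_natCast, PySem.List.pySetD_natCast,
        List.set_set]
      congr 1
      rw [PySem.List.pySetD_of_nonneg _ _ (by positivity),
        show ((a : Int) + (n : Int)).toNat = a + n from by omega]
    have hext : (pvMapEnum condn row).set (a + n) (pvBump row[a + n])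
        = pvMapEnum (fun j c => if (a : Int) ≤ j ∧ j < (a : Int) + (n : Int) + 1
            then pvBump c else c) row := by
      apply List.ext_getElem (by rw [List.length_set, length_pvMapEnum, length_pvMapEnum])
      intro t h1 h2
      have ht : t < row.length := by
        rw [List.length_set, length_pvMapEnum] at h1; exact h1
      rw [getElem_pvMapEnum _ row t ht]
      by_cases hta : t = a + n
      · subst hta
        rw [List.getElem_set_self (by rw [List.length_set, length_pvMapEnum]; exact ht)]
        exact (if_pos (by push_cast; omega)).symm
      · rw [List.getElem_set_ne (by omega)
            (by rw [List.length_set, length_pvMapEnum]; exact ht),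
          getElem_pvMapEnum condn row t ht]
        by_cases htc : (a : Int) ≤ (t : Int) ∧ (t : Int) < (a : Int) + (n : Int)
        · rw [show (condn (t : Int) (row[t]'ht)) = pvBump (row[t]'ht) from if_pos htc]
          exact (if_pos (by omega)).symm
        · rw [show (condn (t : Int) (row[t]'ht)) = (row[t]'ht) from if_neg htc]
          exact (if_neg (by omega)).symm
    show pvColStep (r : Int) _ ((a : Int) + (n : Int)) = _
    unfold pvColStep
    dsimp only
    rw [hrow', hc]
    by_cases h1 : row[a + n] = "."
    · rw [if_pos h1, hkey "x",
        show ("x" : String) = pvBump row[a + n] from by simp [pvBump, h1], hext]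
    · rw [if_neg h1]
      by_cases h2 : row[a + n] = "x"
      · rw [if_pos h2, hkey "X",
          show ("X" : String) = pvBump row[a + n] from by simp [pvBump, h2], hext]
      · rw [if_neg h2, ← hext,
          show pvBump row[a + n] = row[a + n] from by simp [pvBump, h1, h2]]
        have hval : (pvMapEnum condn row)[a + n]'(by rw [length_pvMapEnum]; exact hanlt)
            = row[a + n] := by
          rw [getElem_pvMapEnum condn row (a + n) hanlt, hcondn]
          simp only
          exact if_neg (by push_cast; omega)
        rw [← hval, List.set_getElem_self]

-- what one pass of the row loop body does to the current field, at an in-range row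
theorem pvRowStep_eq (m : List Int) (mf : List (List String)) (r : Nat) (hr : r < mf.length)
    (hcol : pvM m 3 < ((PySem.List.pyGetD mf (r : Int) []).length : Int) - pvM m 2 →
      0 ≤ pvM m 2 ∧ 0 ≤ pvM m 3) :
    pvRowStep m mf (r : Int) =
      PySem.List.pySetD mf (r : Int)
        (pvMapEnum (fun j c =>
            if pvLo m ≤ j ∧ j < pvHi (((PySem.List.pyGetD mf (r : Int) []).length : Int)) m
            then pvBump c else c)
          (PySem.List.pyGetD mf (r : Int) [])) := by
  have e0 : PySem.List.pyGetD m 3 0 = pvM m 3 := rfl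
  have e2 : PySem.List.pyGetD m 2 0 = pvM m 2 := rfl
  set row := PySem.List.pyGetD mf (r : Int) [] with hrowdef
  unfold pvRowStep
  rw [← hrowdef, e0, e2]
  by_cases hne : pvM m 3 < (row.length : Int) - pvM m 2
  · obtain ⟨hm2, hm3⟩ := hcol hne
    have ha : ((pvM m 3).toNat : Int) = pvM m 3 := Int.toNat_of_nonneg hm3
    have hn2 : (((row.length : Int) - pvM m 2 - pvM m 3).toNat : Int)
        = (row.length : Int) - pvM m 2 - pvM m 3 := Int.toNat_of_nonneg (by omega)
    have hrange : PySem.List.pyRange (pvM m 3) ((row.length : Int) - pvM m 2) 1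
        = PySem.List.pyRange (((pvM m 3).toNat : Nat) : Int)
            ((((pvM m 3).toNat : Nat) : Int) + ((((row.length : Int) - pvM m 2 - pvM m 3).toNat : Nat) : Int)) 1 := by
      rw [ha, hn2]; ring_nf
    rw [hrange, pvColLoop_eq r (pvM m 3).toNat ((row.length : Int) - pvM m 2 - pvM m 3).toNat mf hr
      (by rw [← hrowdef]; omega), ← hrowdef]
    congr 1
    apply pvMapEnum_congr
    intro t ht
    by_cases htc : pvLo m ≤ (t : Int) ∧ (t : Int) < pvHi (row.length : Int) m
    · exact (if_pos (by unfold pvLo pvHi at htc; omega)).trans (if_pos htc).symm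
    · exact (if_neg (by unfold pvLo pvHi at htc; omega)).trans (if_neg htc).symm
  · rw [PySem.List.pyRange_one_eq_nil (by omega), List.foldl_nil,
      pvMapEnum_congr (g := fun _ c => c) _
        (by intro t ht; simp only; rw [if_neg (by unfold pvLo pvHi; omega)]),
      pvMapEnum_id, pySetD_self mf r hr]

theorem pvRowLoop_eq (m : List Int) (a n : Nat) (mf : List (List String))
    (hn : a + n ≤ mf.length)
    (hcol : ∀ r : Nat, a ≤ r → r < a + n →
      pvM m 3 < ((PySem.List.pyGetD mf (r : Int) []).length : Int) - pvM m 2 →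
      0 ≤ pvM m 2 ∧ 0 ≤ pvM m 3) :
    (PySem.List.pyRange (a : Int) ((a : Int) + (n : Int)) 1).foldl (pvRowStep m) mf =
      pvMapEnum (fun i row =>
        if (a : Int) ≤ i ∧ i < (a : Int) + (n : Int) then
          pvMapEnum (fun j c =>
            if pvLo m ≤ j ∧ j < pvHi ((row.length : Int)) m then pvBump c else c) row
        else row) mf := by
  induction n generalizing mf with
  | zero =>
    rw [PySem.List.pyRange_one_eq_nil (by omega), List.foldl_nil,
      pvMapEnum_congr (g := fun _ row => row) _
        (by intro t ht; simp only; rw [if_neg (by omega)]),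
      pvMapEnum_id]
  | succ n ih =>
    have hcast : ((a : Int) + ((n + 1 : Nat) : Int)) = ((a : Int) + (n : Int)) + 1 := by
      push_cast; ring
    rw [hcast, PySem.List.pyRange_one_succ_right (by omega), List.foldl_append,
      ih mf (by omega) (by intro t h1 h2 h3; exact hcol t h1 (by omega) h3),
      List.foldl_cons, List.foldl_nil]
    set condn := fun (i : Int) (row : List String) =>
      if (a : Int) ≤ i ∧ i < (a : Int) + (n : Int) then
        pvMapEnum (fun j c =>
          if pvLo m ≤ j ∧ j < pvHi ((row.length : Int)) m then pvBump c else c) row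
      else row with hcondn
    have hlen : a + n < mf.length := by omega
    have hrow' : PySem.List.pyGetD (pvMapEnum condn mf) (((a + n : Nat)) : Int) []
        = mf[a + n] := by
      rw [PySem.List.pyGetD_natCast,
        List.getD_eq_getElem _ [] (by rw [length_pvMapEnum]; exact hlen),
        getElem_pvMapEnum condn mf (a + n) hlen]
      exact if_neg (by push_cast; omega)
    have hstep := pvRowStep_eq m (pvMapEnum condn mf) (a + n)
      (by rw [length_pvMapEnum]; exact hlen)
      (by rw [hrow']; intro h3; exact hcol (a + n) (by omega) (by omega)
            (by rwa [show PySem.List.pyGetD mf (((a + n : Nat)) : Int) [] = mf[a + n] from by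
              rw [PySem.List.pyGetD_natCast, List.getD_eq_getElem _ [] hlen]]))
    rw [show ((a : Int) + (n : Int)) = (((a + n : Nat)) : Int) from by push_cast; ring,
      hstep, hrow']
    apply List.ext_getElem
      (by rw [PySem.List.length_pySetD, length_pvMapEnum, length_pvMapEnum])
    intro t h1 h2
    have ht : t < mf.length := by
      rw [PySem.List.length_pySetD, length_pvMapEnum] at h1; exact h1
    simp only [PySem.List.pySetD_natCast]
    rw [getElem_pvMapEnum _ mf t ht]
    by_cases hta : t = a + n
    · subst hta
      rw [List.getElem_set_self (by rw [List.length_set, length_pvMapEnum]; exact ht)]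
      exact (congrArg _ rfl).trans (if_pos (by push_cast; omega)).symm
    · rw [List.getElem_set_ne (by omega)
          (by rw [List.length_set, length_pvMapEnum]; exact ht),
        getElem_pvMapEnum condn mf t ht]
      by_cases htc : (a : Int) ≤ (t : Int) ∧ (t : Int) < (a : Int) + (n : Int)
      · exact (if_pos htc).trans (if_pos (by push_cast; omega)).symm
      · exact (if_neg htc).trans (if_neg (by push_cast; omega)).symm

theorem pvMineStep_eq (mf : List (List String)) (m : List Int)
    (hp : pvM m 0 < (mf.length : Int) - pvM m 1 →
      0 ≤ pvM m 0 ∧ 0 ≤ pvM m 1 ∧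
      ∀ r : Nat, r < mf.length → pvM m 0 ≤ (r : Int) → (r : Int) < (mf.length : Int) - pvM m 1 →
        pvM m 3 < ((PySem.List.pyGetD mf (r : Int) []).length : Int) - pvM m 2 →
        0 ≤ pvM m 2 ∧ 0 ≤ pvM m 3) :
    pvMineStep mf m =
      pvMapEnum (fun i row =>
        pvMapEnum (fun j c => if pvCov (mf.length : Int) (row.length : Int) i j m then pvBump c else c) row) mf := by
  have hCov : ∀ (L i j : Int), (pvCov (mf.length : Int) L i j m = true) ↔
      ((pvM m 0 ≤ i ∧ i < (mf.length : Int) - pvM m 1) ∧ (pvLo m ≤ j ∧ j < pvHi L m)) := by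
    intro L i j
    simp only [pvCov, Bool.and_eq_true, decide_eq_true_eq]
    tauto
  have e0 : PySem.List.pyGetD m 0 0 = pvM m 0 := rfl
  have e1 : PySem.List.pyGetD m 1 0 = pvM m 1 := rfl
  unfold pvMineStep
  rw [e0, e1]
  by_cases hne : pvM m 0 < (mf.length : Int) - pvM m 1
  · obtain ⟨hm0, hm1, hcol⟩ := hp hne
    have ha : (((pvM m 0).toNat : Nat) : Int) = pvM m 0 := Int.toNat_of_nonneg hm0
    have hn2 : ((((mf.length : Int) - pvM m 1 - pvM m 0).toNat : Nat) : Int)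
        = (mf.length : Int) - pvM m 1 - pvM m 0 := Int.toNat_of_nonneg (by omega)
    rw [show PySem.List.pyRange (pvM m 0) ((mf.length : Int) - pvM m 1) 1
        = PySem.List.pyRange (((pvM m 0).toNat : Nat) : Int)
            ((((pvM m 0).toNat : Nat) : Int)
              + ((((mf.length : Int) - pvM m 1 - pvM m 0).toNat : Nat) : Int)) 1 from by
      rw [ha, hn2]; ring_nf]
    rw [pvRowLoop_eq m (pvM m 0).toNat ((mf.length : Int) - pvM m 1 - pvM m 0).toNat mf
      (by omega)
      (by intro t h1 h2 h3; exact hcol t (by omega) (by omega) (by omega) h3)]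
    apply pvMapEnum_congr
    intro t ht
    by_cases hrt : pvM m 0 ≤ (t : Int) ∧ (t : Int) < (mf.length : Int) - pvM m 1
    · refine (if_pos (by omega)).trans ?_
      apply pvMapEnum_congr
      intro u hu
      by_cases huc : pvLo m ≤ (u : Int) ∧ (u : Int) < pvHi (((mf[t]'ht).length : Nat) : Int) m
      · exact (if_pos huc).trans (if_pos ((hCov _ _ _).mpr ⟨hrt, huc⟩)).symm
      · exact (if_neg huc).trans (if_neg (by rw [hCov]; tauto)).symm
    · refine (if_neg (by omega)).trans ?_
      refine Eq.symm ?_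
      exact (pvMapEnum_congr (g := fun _ c => c) _
        (by intro u hu; exact if_neg (by rw [hCov]; tauto))).trans (pvMapEnum_id _)
  · rw [PySem.List.pyRange_one_eq_nil (by omega), List.foldl_nil]
    refine Eq.symm ?_
    refine (pvMapEnum_congr (g := fun _ row => row) _ ?_).trans (pvMapEnum_id _)
    intro t ht
    exact (pvMapEnum_congr (g := fun _ c => c) _
      (by intro u hu; exact if_neg (by rw [hCov]; intro hcc; omega))).trans (pvMapEnum_id _)

-- the Pre_ facts about one mine, in the form the loop lemmas consume
def pvPreM (mf : List (List String)) (m : List Int) : Prop :=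
  pvM m 0 < (mf.length : Int) - pvM m 1 →
    0 ≤ pvM m 0 ∧ 0 ≤ pvM m 1 ∧
    ∀ r : Nat, r < mf.length → pvM m 0 ≤ (r : Int) → (r : Int) < (mf.length : Int) - pvM m 1 →
      pvM m 3 < ((PySem.List.pyGetD mf (r : Int) []).length : Int) - pvM m 2 →
      0 ≤ pvM m 2 ∧ 0 ≤ pvM m 3

theorem pvSpec_row (mf : List (List String)) (p : List (List Int)) (r : Nat)
    (hr : r < mf.length) :
    PySem.List.pyGetD (pvSpec mf p) (r : Int) [] =
      pvMapEnum (fun j c =>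
        pvRenderI c ((pvCnt (mf.length : Int) (((mf[r]'hr).length : Nat) : Int) (r : Int) j p : Nat) : Int))
        (mf[r]'hr) := by
  unfold pvSpec
  rw [PySem.List.pyGetD_natCast,
    List.getD_eq_getElem _ [] (by rw [length_pvMapEnum]; exact hr),
    getElem_pvMapEnum _ mf r hr]

theorem pvPreM_spec (mf : List (List String)) (p : List (List Int)) (m : List Int)
    (h : pvPreM mf m) : pvPreM (pvSpec mf p) m := by
  intro hne
  rw [show (pvSpec mf p).length = mf.length from by unfold pvSpec; rw [length_pvMapEnum]] at hne ⊢
  obtain ⟨h0, h1, hcol⟩ := h hne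
  refine ⟨h0, h1, ?_⟩
  intro r hr hr0 hr1 hr3
  refine hcol r hr hr0 hr1 ?_
  rw [pvSpec_row mf p r hr, length_pvMapEnum] at hr3
  rwa [PySem.List.pyGetD_natCast, List.getD_eq_getElem _ [] hr]

theorem pvMineStep_spec (mf : List (List String)) (p : List (List Int)) (m : List Int)
    (h : pvPreM mf m) :
    pvMineStep (pvSpec mf p) m = pvSpec mf (p ++ [m]) := by
  rw [pvMineStep_eq (pvSpec mf p) m (pvPreM_spec mf p m h)]
  unfold pvSpec
  rw [pvMapEnum_comp]
  apply pvMapEnum_congr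
  intro t ht
  simp only [length_pvMapEnum]
  rw [pvMapEnum_comp]
  apply pvMapEnum_congr
  intro u hu
  have hcnt : (pvCnt (mf.length : Int) (((mf[t]'ht).length : Nat) : Int) (t : Int) (u : Int) (p ++ [m]) : Nat)
      = (pvCnt (mf.length : Int) (((mf[t]'ht).length : Nat) : Int) (t : Int) (u : Int) p : Nat)
        + (if pvCov (mf.length : Int) (((mf[t]'ht).length : Nat) : Int) (t : Int) (u : Int) m then 1 else 0) := by
    simp [pvCnt, List.countP_append]
  by_cases hc : pvCov (mf.length : Int) (((mf[t]'ht).length : Nat) : Int) (t : Int) (u : Int) m = true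
  · rw [if_pos hc, pvBump_render, hcnt, if_pos hc]
    push_cast
    ring_nf
  · rw [if_neg hc, hcnt, if_neg hc, Nat.add_zero]

theorem pvFold_go (mf : List (List String)) (ms p : List (List Int))
    (hms : ∀ m ∈ ms, pvPreM mf m) :
    ms.foldl pvMineStep (pvSpec mf p) = pvSpec mf (p ++ ms) := by
  induction ms generalizing p with
  | nil => rw [List.foldl_nil, List.append_nil]
  | cons m rest ih =>
    rw [List.foldl_cons, pvMineStep_spec mf p m (hms m (by simp)),
      ih (p ++ [m]) (by intro x hx; exact hms x (by simp [hx])), List.append_assoc]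
    rfl

theorem pvSpec_nil (mf : List (List String)) : pvSpec mf [] = mf := by
  unfold pvSpec
  refine (pvMapEnum_congr (g := fun _ row => row) _ ?_).trans (pvMapEnum_id _)
  intro t ht
  exact (pvMapEnum_congr (g := fun _ c => c) _
    (by intro u hu; simp [pvCnt, pvRenderI])).trans (pvMapEnum_id _)

theorem pvA_eq_spec (mf : List (List String)) (mines : List (List Int))
    (hpre : Pre_add_mines mf mines) :
    add_mines mf mines = pvSpec mf mines := by
  rw [add_mines_eq]
  have hms : ∀ m ∈ mines, pvPreM mf m := by
    intro m hm
    obtain ⟨-, h⟩ := hpre m hm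
    intro hne
    have hg0 : pvM m 0 = m.getD 0 0 := PySem.List.pyGetD_natCast m 0 0
    have hg1 : pvM m 1 = m.getD 1 0 := PySem.List.pyGetD_natCast m 1 0
    have hg2 : pvM m 2 = m.getD 2 0 := PySem.List.pyGetD_natCast m 2 0
    have hg3 : pvM m 3 = m.getD 3 0 := PySem.List.pyGetD_natCast m 3 0
    rw [hg0, hg1] at hne
    obtain ⟨-, h0, h1, hcol⟩ := h hne
    refine ⟨by omega, by omega, ?_⟩
    intro r hr hr0 hr1 hr3
    have hmem : ((0 : Int) + (r : Int), mf[r]'hr) ∈ PySem.List.enumerate mf 0 :=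
      (PySem.List.mem_enumerate_iff _ _ _).mpr ⟨r, hr, rfl⟩
    have := hcol _ hmem (by rw [hg0] at hr0; simpa using hr0)
      (by rw [hg1] at hr1; simpa using hr1)
      (by rw [hg2, hg3] at hr3
          simpa using (by rwa [PySem.List.pyGetD_natCast, List.getD_eq_getElem _ [] hr] at hr3))
    rw [hg2, hg3]
    exact this
  calc mines.foldl pvMineStep mf
      = mines.foldl pvMineStep (pvSpec mf []) := by rw [pvSpec_nil]
    _ = pvSpec mf ([] ++ mines) := pvFold_go mf mines [] hms
    _ = pvSpec mf mines := by rw [List.nil_append]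

-- ===== VERDICT (by name: the statement is the Claim_ definition above) =====
theorem add_mines_spec : Claim_equal_add_mines := by
  intro minefield mines _ hpre
  unfold Spec_add_mines
  rw [pvA_eq_spec minefield mines hpre, pvB_eq_spec]
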